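-- pv_equiv track=rewrite | github.com/jacopofar/advent2022 | advent2022/day22.py | axis_in_common
-- ===== SOURCE A (Python) =====
-- from typing import Callable, Iterable
--
-- def axis_in_common(s: Iterable[tuple[int, int, int]]) -> int:
--     axis_id = -1
--     for idx in (0, 1, 2):
--         if sum(v[idx] for v in s) in (0, 4):
--             axis_id = idx
--             break
--     assert axis_id != -1
--     return axis_id
-- ===== SOURCE B (Python) =====
-- def axis_in_common(s):
--     vs = list(s)
--
--     def vecsum(lo, hi):
--         # divide-and-conquer componentwise sum of vs[lo:hi]
--         if hi - lo == 0:
--             return (0, 0, 0)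
--         if hi - lo == 1:
--             return vs[lo]
--         mid = (lo + hi) // 2
--         a = vecsum(lo, mid)
--         b = vecsum(mid, hi)
--         return (a[0] + b[0], a[1] + b[1], a[2] + b[2])
--
--     t = vecsum(0, len(vs))
--     for idx in (0, 1, 2):
--         if t[idx] in (0, 4):
--             return idx
--     assert False
-- ===== Notes on version B (the rewrite author's own statement) =====
-- stated objective: alternative
-- what changed: B materialises s and computes the three axis totals by a balanced divide-and-conquer recursion over index halves (a binary summation tree of vector sums), then picks the first axis whose total is 0 or 4, instead of A's up-to-three sequential full scans with an early break.
import Mathlib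
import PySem

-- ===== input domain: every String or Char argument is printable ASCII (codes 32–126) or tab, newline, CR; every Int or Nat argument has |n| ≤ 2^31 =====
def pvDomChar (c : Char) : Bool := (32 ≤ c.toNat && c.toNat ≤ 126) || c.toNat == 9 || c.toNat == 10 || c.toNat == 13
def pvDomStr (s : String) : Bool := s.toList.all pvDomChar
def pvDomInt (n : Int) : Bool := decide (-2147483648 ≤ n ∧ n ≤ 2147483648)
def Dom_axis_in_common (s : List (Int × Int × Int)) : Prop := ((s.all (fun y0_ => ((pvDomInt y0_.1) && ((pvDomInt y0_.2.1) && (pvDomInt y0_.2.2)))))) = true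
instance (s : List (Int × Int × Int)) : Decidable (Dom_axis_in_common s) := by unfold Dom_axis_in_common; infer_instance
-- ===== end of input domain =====

-- B replaces A's up-to-three sequential full scans (one sum per axis, early break) by a
-- balanced divide-and-conquer recursion computing all three axis totals as a vector sum,
-- then the first-axis check (objective: alternative, same return value).


-- ===== PORT A =====
-- loop over idx in (0,1,2) with break, each iteration summing v[idx] over the whole of s
def axis_in_common (s : List (Int × Int × Int)) : Int :=
  if (s.foldl (fun a v => a + v.1) 0) = 0 ∨ (s.foldl (fun a v => a + v.1) 0) = 4 then 0
  else if (s.foldl (fun a v => a + v.2.1) 0) = 0 ∨ (s.foldl (fun a v => a + v.2.1) 0) = 4 then 1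
  else if (s.foldl (fun a v => a + v.2.2) 0) = 0 ∨ (s.foldl (fun a v => a + v.2.2) 0) = 4 then 2
  else -1  -- axis_id stays -1: the Python's assert fails; such inputs are outside Pre_

-- ===== PORT B =====
-- vecsum(lo, hi): divide-and-conquer componentwise sum of vs[lo:hi]; here the slice
-- vs[lo:hi] is the list itself, and mid = (lo+hi)//2 splits it at length/2
def pvVecSum (l : List (Int × Int × Int)) : Int × Int × Int :=
  if h : l.length ≤ 1 then
    match l with
    | [] => (0, 0, 0)
    | v :: _ => v
  else
    let m := l.length / 2
    let a := pvVecSum (l.take m)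
    let b := pvVecSum (l.drop m)
    (a.1 + b.1, a.2.1 + b.2.1, a.2.2 + b.2.2)
termination_by l.length
decreasing_by
  · simp; omega
  · simp; omega

def axis_in_common_alt (s : List (Int × Int × Int)) : Int :=
  let t := pvVecSum s
  if t.1 = 0 ∨ t.1 = 4 then 0
  else if t.2.1 = 0 ∨ t.2.1 = 4 then 1
  else if t.2.2 = 0 ∨ t.2.2 = 4 then 2
  else -1  -- assert False in the Python; outside Pre_

-- ===== PRECONDITION & SPEC =====
-- Pre_ excludes exactly the inputs on which A's assert fails (AssertionError): no axis
-- total is 0 or 4. B's assert fails there too.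
def Pre_axis_in_common (s : List (Int × Int × Int)) : Prop :=
  (s.map (·.1)).sum = 0 ∨ (s.map (·.1)).sum = 4 ∨
  (s.map (·.2.1)).sum = 0 ∨ (s.map (·.2.1)).sum = 4 ∨
  (s.map (·.2.2)).sum = 0 ∨ (s.map (·.2.2)).sum = 4
instance (s : List (Int × Int × Int)) : Decidable (Pre_axis_in_common s) := by unfold Pre_axis_in_common; infer_instance
def pvWitness_axis_in_common : (List (Int × Int × Int)) := [(1, 2, 3), (-1, 2, 3)]
def Spec_axis_in_common (s : List (Int × Int × Int)) (out : Int) : Prop := out = axis_in_common_alt s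
instance (s : List (Int × Int × Int)) (out : Int) : Decidable (Spec_axis_in_common s out) := by unfold Spec_axis_in_common; infer_instance

-- ===== CLAIM (what is proved, stated in full; the proofs are below) =====
def Claim_equal_axis_in_common : Prop := ∀ (s : List (Int × Int × Int)), Dom_axis_in_common s → Pre_axis_in_common s → Spec_axis_in_common s (axis_in_common s)

-- ===== LEMMAS AND PROOFS =====
-- B's divide-and-conquer vector sum computes the three componentwise list sums.
theorem pvVecSum_eq (l : List (Int × Int × Int)) :
    pvVecSum l = ((l.map (·.1)).sum, (l.map (·.2.1)).sum, (l.map (·.2.2)).sum) := by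
  fun_induction pvVecSum l with
  | case1 => simp
  | case2 v t h =>
    cases t with
    | nil => simp
    | cons x xs => simp at h
  | case3 l h m a b ih1 ih2 =>
    simp only [a, b, ih1, ih2]
    refine Prod.ext ?_ (Prod.ext ?_ ?_) <;>
      simp [← List.sum_append, List.take_append_drop]

-- A's per-axis foldl is the componentwise list sum.
theorem foldl_add_sum (f : (Int × Int × Int) → Int) (l : List (Int × Int × Int)) (c : Int) :
    l.foldl (fun a v => a + f v) c = c + (l.map f).sum := by
  induction l generalizing c with
  | nil => simp
  | cons h t ih => simp [List.foldl, ih]; ring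

-- ===== VERDICT (by name: the statement is the Claim_ definition above) =====
theorem axis_in_common_spec : Claim_equal_axis_in_common := by
  intro s _ _
  unfold Spec_axis_in_common axis_in_common axis_in_common_alt
  rw [pvVecSum_eq, foldl_add_sum, foldl_add_sum, foldl_add_sum]
  simp
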